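-- pv_equiv track=rewrite | github.com/lolcat-max/res_dist | res_dist.py | get_standard_puzzle
-- ===== SOURCE A (Python) =====
-- def get_standard_puzzle(n):
--     if n == 9:
--         return [
--             [5,3,0, 0,7,0, 0,0,0],
--             [6,0,0, 1,9,5, 0,0,0],
--             [0,9,8, 0,0,0, 0,6,0],
--             [8,0,0, 0,6,0, 0,0,3],
--             [4,0,0, 8,0,3, 0,0,1],
--             [7,0,0, 0,2,0, 0,0,6],
--             [0,6,0, 0,0,0, 2,8,0],
--             [0,0,0, 4,1,9, 0,0,5],
--             [0,0,0, 0,8,0, 0,7,9],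
--         ]
--     elif n == 16:
--         return [
--             [1,0,0,0, 0,0,0,0, 0,0,0,0, 0,0,0,0],
--             [0,0,0,0, 2,0,0,0, 0,0,0,0, 3,0,0,0],
--             [0,0,0,0, 0,0,0,0, 0,4,0,0, 0,0,0,0],
--             [0,0,0,0, 0,5,0,0, 0,0,0,0, 0,0,0,6],
--             [0,7,0,0, 0,0,0,0, 0,0,8,0, 0,0,0,0],
--             [0,0,0,0, 0,0,0,9, 0,0,0,0, 0,0,0,0],
--             [0,0,0,0,10,0,0,0, 0,0,0,0, 0,0,0,0],
--             [0,0,0,0, 0,0,0,0,11,0,0,0, 0,0,0,0],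
--             [0,0,0,0, 0,0,12,0, 0,0,0,0, 0,0,0,0],
--             [0,0,0,0, 0,0,0,0, 0,0,0,13,0,0,0,0],
--             [0,0,0,0, 0,0,0,0, 0,0,0,0, 0,14,0,0],
--             [0,0,0,0, 0,0,0,0, 0,0,0,0, 0,0,0,0],
--             [0,0,0,0, 0,0,0,0, 0,0,0,0,15,0,0,0],
--             [0,0,0,0, 0,0,0,0, 0,0,0,0, 0,0,16,0],
--             [0,0,0,0, 0,0,0,0, 0,0,0,0, 0,0,0,0],
--             [0,0,0,0, 0,0,0,0, 0,0,0,0, 0,0,0,0],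
--         ]
--     else:
--         return [[0]*n for _ in range(n)]
-- ===== SOURCE B (Python) =====
-- # Boards stored as flat one-character-per-cell strings and decoded on demand:
-- # digits for the 9x9 board, '.' = empty and 'A'..'P' = 1..16 for the 16x16 board.
-- P9 = ("530070000600195000098000060800060003"
--       "400803001700020006060000280000419005000080079")
--
-- P16 = ("A...................B.......C............D...........E........."
--        "F.G........H............I............J...................K....."
--        "........L....................M.................N................"
--        "..............O.................P.................................")
--
-- ALPHABET16 = ".ABCDEFGHIJKLMNOP"
--
-- def get_standard_puzzle(n):
--     if n == 9:
--         return [[int(ch) for ch in P9[r * 9:(r + 1) * 9]] for r in range(9)]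
--     if n == 16:
--         return [[ALPHABET16.index(ch) for ch in P16[r * 16:(r + 1) * 16]]
--                 for r in range(16)]
--     return [[0] * n for _ in range(n)]
-- ===== Notes on version B (the rewrite author's own statement) =====
-- stated objective: alternative
-- what changed: Stores each fixed board as a flat one-character-per-cell string (digits for 9x9, '.'/'A'..'P' for 16x16) and decodes it with per-row slicing and a character-to-value lookup, instead of returning dense nested list literals.
import Mathlib
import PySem

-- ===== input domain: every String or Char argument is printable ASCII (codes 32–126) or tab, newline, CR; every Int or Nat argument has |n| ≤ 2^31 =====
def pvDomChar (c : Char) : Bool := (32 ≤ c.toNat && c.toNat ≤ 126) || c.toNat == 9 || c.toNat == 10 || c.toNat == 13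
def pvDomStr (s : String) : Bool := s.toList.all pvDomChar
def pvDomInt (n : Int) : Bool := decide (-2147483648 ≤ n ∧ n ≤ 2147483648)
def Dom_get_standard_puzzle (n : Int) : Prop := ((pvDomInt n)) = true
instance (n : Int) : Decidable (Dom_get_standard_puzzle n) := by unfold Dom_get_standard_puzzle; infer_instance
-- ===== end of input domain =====

-- B stores each fixed board as a flat one-character-per-cell string and decodes it
-- (digits for 9x9, '.'/'A'..'P' for 16x16) instead of dense nested list literals; objective: alternative.

-- ===== PORT A =====
def get_standard_puzzle (n : Int) : List (List Int) :=
  if n = 9 then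
    [
      [5,3,0, 0,7,0, 0,0,0],
      [6,0,0, 1,9,5, 0,0,0],
      [0,9,8, 0,0,0, 0,6,0],
      [8,0,0, 0,6,0, 0,0,3],
      [4,0,0, 8,0,3, 0,0,1],
      [7,0,0, 0,2,0, 0,0,6],
      [0,6,0, 0,0,0, 2,8,0],
      [0,0,0, 4,1,9, 0,0,5],
      [0,0,0, 0,8,0, 0,7,9]
    ]
  else if n = 16 then
    [
      [1,0,0,0, 0,0,0,0, 0,0,0,0, 0,0,0,0],
      [0,0,0,0, 2,0,0,0, 0,0,0,0, 3,0,0,0],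
      [0,0,0,0, 0,0,0,0, 0,4,0,0, 0,0,0,0],
      [0,0,0,0, 0,5,0,0, 0,0,0,0, 0,0,0,6],
      [0,7,0,0, 0,0,0,0, 0,0,8,0, 0,0,0,0],
      [0,0,0,0, 0,0,0,9, 0,0,0,0, 0,0,0,0],
      [0,0,0,0,10,0,0,0, 0,0,0,0, 0,0,0,0],
      [0,0,0,0, 0,0,0,0,11,0,0,0, 0,0,0,0],
      [0,0,0,0, 0,0,12,0, 0,0,0,0, 0,0,0,0],
      [0,0,0,0, 0,0,0,0, 0,0,0,13,0,0,0,0],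
      [0,0,0,0, 0,0,0,0, 0,0,0,0, 0,14,0,0],
      [0,0,0,0, 0,0,0,0, 0,0,0,0, 0,0,0,0],
      [0,0,0,0, 0,0,0,0, 0,0,0,0,15,0,0,0],
      [0,0,0,0, 0,0,0,0, 0,0,0,0, 0,0,16,0],
      [0,0,0,0, 0,0,0,0, 0,0,0,0, 0,0,0,0],
      [0,0,0,0, 0,0,0,0, 0,0,0,0, 0,0,0,0]
    ]
  else
    -- [[0]*n for _ in range(n)]; [0]*n is [] for n ≤ 0, exactly List.replicate n.toNat 0
    (PySem.List.pyRange 0 n 1).map (fun _ => List.replicate n.toNat 0)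

-- ===== PORT B =====
-- the module-level flat board strings of Source B
def pvP9 : String :=
  "530070000600195000098000060800060003400803001700020006060000280000419005000080079"

def pvP16 : String :=
  "A...................B.......C............D...........E.........F.G........H............I............J...................K.............L....................M.................N..............................O.................P................................."

def pvAlphabet16 : String := ".ABCDEFGHIJKLMNOP"

def get_standard_puzzle_alt (n : Int) : List (List Int) :=
  if n = 9 then
    -- [[int(ch) for ch in P9[r*9:(r+1)*9]] for r in range(9)]
    -- int(ch) on the single digit character ch is exactly its decimal value
    (PySem.List.pyRange 0 9 1).map (fun r =>
      (PySem.List.slice pvP9.toList (some (r * 9)) (some ((r + 1) * 9))).map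
        (fun ch => ((ch.toNat - '0'.toNat : Nat) : Int)))
  else if n = 16 then
    -- [[ALPHABET16.index(ch) for ch in P16[r*16:(r+1)*16]] for r in range(16)]
    -- every ch of P16 occurs in ALPHABET16, so .index returns its position
    (PySem.List.pyRange 0 16 1).map (fun r =>
      (PySem.List.slice pvP16.toList (some (r * 16)) (some ((r + 1) * 16))).map
        (fun ch => ((PySem.List.index? pvAlphabet16.toList ch).getD 0 : Int)))
  else
    (PySem.List.pyRange 0 n 1).map (fun _ => List.replicate n.toNat 0)

-- ===== PRECONDITION & SPEC =====
def Spec_get_standard_puzzle (n : Int) (out : List (List Int)) : Prop := out = get_standard_puzzle_alt n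
instance (n : Int) (out : List (List Int)) : Decidable (Spec_get_standard_puzzle n out) := by unfold Spec_get_standard_puzzle; infer_instance

-- ===== CLAIM =====
def Claim_equal_get_standard_puzzle : Prop := ∀ (n : Int), Dom_get_standard_puzzle n → Spec_get_standard_puzzle n (get_standard_puzzle n)

-- ===== LEMMAS AND PROOFS =====

theorem pv_eq_9 : get_standard_puzzle 9 = get_standard_puzzle_alt 9 := by decide

set_option maxRecDepth 4000 in
theorem pv_eq_16 : get_standard_puzzle 16 = get_standard_puzzle_alt 16 := by decide

-- ===== VERDICT =====
theorem get_standard_puzzle_spec : Claim_equal_get_standard_puzzle := by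
  intro n _
  unfold Spec_get_standard_puzzle
  by_cases h9 : n = 9
  · subst h9; exact pv_eq_9
  · by_cases h16 : n = 16
    · subst h16; exact pv_eq_16
    · simp [get_standard_puzzle, get_standard_puzzle_alt, h9, h16]
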